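-- pv_equiv track=rewrite | github.com/kewh5868/SAXShell | src/saxshell/clusterdynamicsml/ui/main_window.py | _format_int_sequence
-- ===== SOURCE A (Python) =====
-- def _format_int_sequence(values: tuple[int, ...] | list[int]) -> str:
--     sequence = tuple(int(value) for value in values)
--     if not sequence:
--         return "n/a"
--     if len(sequence) == 1:
--         return str(sequence[0])
--     expected = tuple(range(sequence[0], sequence[-1] + 1))
--     if sequence == expected:
--         return f"{sequence[0]}-{sequence[-1]}"
--     return ",".join(str(value) for value in sequence)
-- ===== SOURCE B (Python) =====
-- def _format_int_sequence(values):
--     sequence = [int(v) for v in values]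
--     if not sequence:
--         return "n/a"
--     if len(sequence) == 1:
--         return str(sequence[0])
--     if all(b == a + 1 for a, b in zip(sequence, sequence[1:])):
--         return f"{sequence[0]}-{sequence[-1]}"
--     return ",".join(str(v) for v in sequence)
-- ===== Notes on version B (the rewrite author's own statement) =====
-- stated objective: simpler
-- what changed: Replaces building the full expected tuple(range(first,last+1)) and comparing tuples with a single running adjacency test over consecutive pairs (zip with the tail), so no second sequence is materialized.
import Mathlib
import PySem

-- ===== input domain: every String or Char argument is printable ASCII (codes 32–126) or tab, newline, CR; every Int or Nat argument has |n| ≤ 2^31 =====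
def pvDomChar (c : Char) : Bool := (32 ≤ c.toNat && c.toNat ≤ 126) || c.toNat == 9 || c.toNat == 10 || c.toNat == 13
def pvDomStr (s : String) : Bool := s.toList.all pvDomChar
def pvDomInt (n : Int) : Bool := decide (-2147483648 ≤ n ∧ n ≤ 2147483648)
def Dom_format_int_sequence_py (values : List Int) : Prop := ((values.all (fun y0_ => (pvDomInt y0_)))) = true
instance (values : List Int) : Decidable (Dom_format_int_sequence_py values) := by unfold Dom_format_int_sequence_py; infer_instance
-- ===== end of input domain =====

-- B replaces A's build-and-compare against tuple(range(first,last+1)) with a direct consecutive-pairs adjacency test (simpler, no materialized range).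

-- ===== PORT A =====
def format_int_sequence_py (values : List Int) : String :=
  let sequence := values
  if sequence = [] then "n/a"
  else if sequence.length = 1 then PySem.Int.toStr (sequence.headD 0)
  else
    let expected := PySem.List.pyRange (sequence.headD 0) (sequence.getLastD 0 + 1) 1
    if sequence = expected then
      PySem.Int.toStr (sequence.headD 0) ++ "-" ++ PySem.Int.toStr (sequence.getLastD 0)
    else
      PySem.Str.join "," (sequence.map PySem.Int.toStr)

-- ===== PORT B =====
def format_int_sequence_py_alt (values : List Int) : String :=
  match values with
  | [] => "n/a"
  | [x] => PySem.Int.toStr x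
  | _ =>
    if (values.zip values.tail).all (fun p => p.2 == p.1 + 1) then
      PySem.Int.toStr (values.headD 0) ++ "-" ++ PySem.Int.toStr (values.getLastD 0)
    else
      PySem.Str.join "," (values.map PySem.Int.toStr)

-- ===== PRECONDITION & SPEC =====
def Spec_format_int_sequence_py (values : List Int) (out : String) : Prop := out = format_int_sequence_py_alt values
instance (values : List Int) (out : String) : Decidable (Spec_format_int_sequence_py values out) := by unfold Spec_format_int_sequence_py; infer_instance

-- ===== CLAIM (what is proved, stated in full; the proofs are below) =====
def Claim_equal_format_int_sequence_py : Prop := ∀ (values : List Int), Dom_format_int_sequence_py values → Spec_format_int_sequence_py values (format_int_sequence_py values)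

-- ===== LEMMAS AND PROOFS =====

-- Adjacency of consecutive pairs characterizes being exactly the integer range from head to last.
theorem chain_iff_pyRange (l : List Int) (a : Int) :
    (((a :: l).zip l).all (fun p => p.2 == p.1 + 1) = true) ↔
      a :: l = PySem.List.pyRange a ((a :: l).getLastD 0 + 1) 1 := by
  induction l generalizing a with
  | nil =>
    simp [PySem.List.pyRange_one_singleton]
  | cons b t ih =>
    constructor
    · intro h
      simp only [List.zip_cons_cons, List.all_cons, Bool.and_eq_true, beq_iff_eq] at h
      obtain ⟨hb, hrest⟩ := h
      have hrest' : ((b :: t).zip t).all (fun p => p.2 == p.1 + 1) = true := by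
        simpa using hrest
      have htail := (ih b).mp hrest'
      have hlast : (a :: b :: t).getLastD 0 = (b :: t).getLastD 0 := by
        simp [List.getLastD]
      rw [hlast]
      have hne : b :: t ≠ [] := by simp
      have hlt : b < (b :: t).getLastD 0 + 1 := by
        by_contra hge
        rw [PySem.List.pyRange_one_eq_nil (by omega)] at htail
        exact hne htail
      have halt : a < (b :: t).getLastD 0 + 1 := by omega
      rw [PySem.List.pyRange_one_cons halt, ← hb, ← htail]
    · intro h
      have hlast : (a :: b :: t).getLastD 0 = (b :: t).getLastD 0 := by
        simp [List.getLastD]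
      rw [hlast] at h
      have halt : a < (b :: t).getLastD 0 + 1 := by
        by_contra hge
        rw [PySem.List.pyRange_one_eq_nil (by omega)] at h
        simp at h
      rw [PySem.List.pyRange_one_cons halt] at h
      have h' : b :: t = PySem.List.pyRange (a + 1) ((b :: t).getLastD 0 + 1) 1 := by
        exact (List.cons.injEq _ _ _ _ ▸ h).2
      have hb : b = a + 1 := by
        have hne : PySem.List.pyRange (a + 1) ((b :: t).getLastD 0 + 1) 1 ≠ [] := by
          rw [← h']; simp
        by_cases hlt : a + 1 < (b :: t).getLastD 0 + 1
        · rw [PySem.List.pyRange_one_cons hlt] at h'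
          exact (List.cons.injEq _ _ _ _ ▸ h').1
        · rw [PySem.List.pyRange_one_eq_nil (by omega)] at h'
          simp at h'
      subst hb
      have hrest' := (ih (a + 1)).mpr h'
      simp only [List.zip_cons_cons, List.all_cons, Bool.and_eq_true, beq_iff_eq]
      exact ⟨by simp, by simpa using hrest'⟩

-- ===== VERDICT (by name: the statement is the Claim_ definition above) =====
theorem format_int_sequence_py_spec : Claim_equal_format_int_sequence_py := by
  intro values _
  unfold Spec_format_int_sequence_py format_int_sequence_py format_int_sequence_py_alt
  match values with
  | [] => rfl
  | [x] => rfl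
  | a :: b :: t =>
    have hiff := chain_iff_pyRange (b :: t) a
    simp only [List.tail_cons, List.headD_cons]
    by_cases hc : ((a :: b :: t).zip (b :: t)).all (fun p => p.2 == p.1 + 1) = true
    · have heq := hiff.mp hc
      rw [if_neg (by simp), if_neg (by simp), if_pos heq, if_pos hc]
    · have hne : a :: b :: t ≠ PySem.List.pyRange a ((a :: b :: t).getLastD 0 + 1) 1 :=
        fun h => hc (hiff.mpr h)
      rw [if_neg (by simp), if_neg (by simp), if_neg hne, if_neg hc]
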